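-- pv_equiv track=rewrite | github.com/madalintat/surogate | surogate/core/datasets/preprocessor/row.py | rows_to_batched
-- ===== SOURCE A (Python) =====
-- from typing import Optional, Dict, Union, Any, List
--
-- def rows_to_batched(rows: List[Dict[str, Any]]):
--     batched = {}
--     for i, row in enumerate(rows):
--         for k, v in row.items():
--             if k not in batched:
--                 batched[k] = [None] * i
--             batched[k].append(v)
--         # Make all the lengths of v the same.
--         for k in set(batched.keys()) - set(row.keys()):
--             batched[k].append(None)
--     return batched
-- ===== SOURCE B (Python) =====
-- def rows_to_batched(rows):
--     keys = list(dict.fromkeys(k for row in rows for k in row))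
--     return {k: [row.get(k) for row in rows] for k in keys}
-- ===== Notes on version B (the rewrite author's own statement) =====
-- stated objective: simpler
-- what changed: Replaces A's interleaved per-row incremental padding (insert [None]*i, append, then pad absent keys each row) with a two-phase build: one ordered dedup pass collecting keys in first-seen order, then a dict comprehension mapping each key to its column [row.get(k) for row in rows].
import Mathlib
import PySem

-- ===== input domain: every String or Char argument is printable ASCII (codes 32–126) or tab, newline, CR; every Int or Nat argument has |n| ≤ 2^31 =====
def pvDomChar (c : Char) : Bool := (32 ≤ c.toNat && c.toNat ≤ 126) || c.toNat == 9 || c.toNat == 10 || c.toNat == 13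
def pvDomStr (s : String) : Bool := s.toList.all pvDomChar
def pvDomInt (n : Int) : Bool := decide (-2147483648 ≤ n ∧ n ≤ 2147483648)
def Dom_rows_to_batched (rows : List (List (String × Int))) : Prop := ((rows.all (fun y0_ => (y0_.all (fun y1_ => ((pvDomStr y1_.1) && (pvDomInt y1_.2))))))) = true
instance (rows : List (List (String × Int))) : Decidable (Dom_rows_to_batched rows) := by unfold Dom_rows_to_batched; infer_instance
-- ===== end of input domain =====

-- B replaces A's interleaved per-row incremental padding with a collect-keys-then-build-columns
-- decomposition (objective: simpler). Each input row is a Python dict, represented as an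
-- association list and interpreted through PySem.Dict.ofList (duplicate keys: last value wins).

-- ===== PORT A =====
-- One row of A's loop: i = running index, second component = the dict `batched`.
-- A's second loop iterates `set(batched.keys()) - set(row.keys())` in Python's set order; each
-- iteration appends to a DIFFERENT key's list, so the resulting dict does not depend on that
-- order; here the same keys are visited in `batched`'s insertion order (exact final dict).
def rowStepA (st : Nat × PySem.Dict String (List (Option Int)))
    (rowL : List (String × Int)) : Nat × PySem.Dict String (List (Option Int)) :=
  let i := st.1
  let row := PySem.Dict.ofList rowL
  let b := row.items.foldl (fun b kv =>
    let b := if b.contains kv.1 then b else b.insert kv.1 (List.replicate i none)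
    b.modify kv.1 [] (fun l => l ++ [some kv.2])) st.2
  let b := b.keys.foldl (fun b' k =>
    if row.contains k then b' else b'.modify k [] (fun l => l ++ [none])) b
  (i + 1, b)

def rows_to_batched (rows : List (List (String × Int))) : List (String × List (Option Int)) :=
  (rows.foldl rowStepA (0, PySem.Dict.empty)).2.items

-- ===== PORT B =====
def rows_to_batched_alt (rows : List (List (String × Int))) : List (String × List (Option Int)) :=
  -- keys = list(dict.fromkeys(k for row in rows for k in row))
  let keys := PySem.List.dedup (rows.flatMap (fun r => (PySem.Dict.ofList r).keys))
  -- {k: [row.get(k) for row in rows] for k in keys}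
  (keys.foldl (fun d k =>
    d.insert k (rows.map (fun r => (PySem.Dict.ofList r).get? k))) PySem.Dict.empty).items

-- ===== PRECONDITION & SPEC =====
def Spec_rows_to_batched (rows : List (List (String × Int))) (out : List (String × List (Option Int))) : Prop := out = rows_to_batched_alt rows
instance (rows : List (List (String × Int))) (out : List (String × List (Option Int))) : Decidable (Spec_rows_to_batched rows out) := by unfold Spec_rows_to_batched; infer_instance

-- ===== CLAIM (what is proved, stated in full; the proofs are below) =====
def Claim_equal_rows_to_batched : Prop := ∀ (rows : List (List (String × Int))), Dom_rows_to_batched rows → Spec_rows_to_batched rows (rows_to_batched rows)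

-- ===== LEMMAS AND PROOFS =====

-- keys of a row's dict
def dkOf (r : List (String × Int)) : List String := (PySem.Dict.ofList r).keys
-- row.get(k)
def gvOf (r : List (String × Int)) (k : String) : Option Int := (PySem.Dict.ofList r).get? k
-- the column for key k over the processed prefix
def colS (pre : List (List (String × Int))) (k : String) : List (Option Int) :=
  pre.map (fun r => gvOf r k)
-- keys in first-seen order over the prefix
def KS (pre : List (List (String × Int))) : List String :=
  PySem.List.dedup (pre.flatMap dkOf)
-- the value of `batched` after processing the prefix
def SD (pre : List (List (String × Int))) : PySem.Dict String (List (Option Int)) :=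
  PySem.Dict.mk ((KS pre).map (fun k => (k, colS pre k)))


-- the two loop bodies of rowStepA, named for the proofs (definitionally equal to the lambdas)
def stepIn (i : Nat) (b : PySem.Dict String (List (Option Int))) (kv : String × Int) :
    PySem.Dict String (List (Option Int)) :=
  let b := if b.contains kv.1 then b else b.insert kv.1 (List.replicate i none)
  b.modify kv.1 [] (fun l => l ++ [some kv.2])

def stepOut (row : PySem.Dict String Int) (b' : PySem.Dict String (List (Option Int)))
    (k : String) : PySem.Dict String (List (Option Int)) :=
  if row.contains k then b' else b'.modify k [] (fun l => l ++ [none])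

lemma rowStepA_eq (n : Nat) (d : PySem.Dict String (List (Option Int)))
    (r : List (String × Int)) :
    rowStepA (n, d) r =
      (n + 1, ((PySem.Dict.ofList r).items.foldl (stepIn n) d).keys.foldl
        (stepOut (PySem.Dict.ofList r)) ((PySem.Dict.ofList r).items.foldl (stepIn n) d)) := rfl

lemma dict_contains_eq_keys_contains (d : PySem.Dict String (List (Option Int))) (k : String) :
    d.contains k = PySem.Set.contains d.keys k := by
  simp [PySem.Set.contains, PySem.Dict.contains_eq_decide_mem_keys]

lemma set_update_nodup (s : PySem.Set String) (h : s.Nodup) (l : List String) :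
    (s.update l).Nodup := by
  rw [PySem.Set.update_eq_append_filter]
  refine List.Nodup.append h ((PySem.Set.nodup_ofList l).filter _) ?_
  intro x hx hx'
  have h2 := List.of_mem_filter hx'
  simp at h2
  exact h2 hx

lemma mem_set_update (s : PySem.Set String) (l : List String) (k : String)
    (h : k ∈ s.update l) : k ∈ s ∨ k ∈ l := by
  rw [PySem.Set.update_eq_append_filter] at h
  rcases List.mem_append.mp h with h | h
  · exact Or.inl h
  · exact Or.inr ((PySem.Set.mem_ofList l k).mp (List.mem_of_mem_filter h))

-- per-step facts for the inner loop
lemma stepIn_keys (i : Nat) (b : PySem.Dict String (List (Option Int))) (kv : String × Int) :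
    (stepIn i b kv).keys = PySem.Set.add b.keys kv.1 := by
  unfold stepIn PySem.Set.add
  rw [← dict_contains_eq_keys_contains]
  by_cases h : b.contains kv.1 = true
  · rw [if_pos h, if_pos h, PySem.Dict.keys_modify,
      PySem.Dict.keys_insert_of_contains _ _ h]
  · rw [if_neg h, if_neg h, PySem.Dict.keys_modify]
    have hc : (b.insert kv.1 (List.replicate i none)).contains kv.1 = true :=
      PySem.Dict.contains_insert_self b kv.1 _
    rw [PySem.Dict.keys_insert_of_contains _ _ hc,
      PySem.Dict.keys_insert_of_not_contains _ _ (by simpa using h)]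

lemma stepIn_contains_ne (i : Nat) (b : PySem.Dict String (List (Option Int)))
    (kv : String × Int) (k : String) (h : k ≠ kv.1) :
    (stepIn i b kv).contains k = b.contains k := by
  unfold stepIn
  by_cases hc : b.contains kv.1 = true
  · simp [hc, PySem.Dict.contains_modify, h]
  · simp [hc, PySem.Dict.contains_modify, PySem.Dict.contains_insert, h]

lemma stepIn_getD_ne (i : Nat) (b : PySem.Dict String (List (Option Int)))
    (kv : String × Int) (k : String) (h : k ≠ kv.1) :
    (stepIn i b kv).getD k [] = b.getD k [] := by
  unfold stepIn
  rw [PySem.Dict.getD_modify_of_ne _ _ _ h]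
  by_cases hc : b.contains kv.1 = true
  · rw [if_pos hc]
  · rw [if_neg hc, PySem.Dict.getD_insert_of_ne _ _ _ h]

lemma stepIn_getD_self (i : Nat) (b : PySem.Dict String (List (Option Int))) (kv : String × Int) :
    (stepIn i b kv).getD kv.1 [] =
      (if b.contains kv.1 then b.getD kv.1 [] else List.replicate i none) ++ [some kv.2] := by
  unfold stepIn
  rw [PySem.Dict.getD_modify_self]
  by_cases hc : b.contains kv.1 = true
  · rw [if_pos hc, if_pos hc]
  · rw [if_neg hc, if_neg hc, PySem.Dict.getD_insert_self]

-- the inner loop as a whole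
lemma innerF_keys (i : Nat) (ps : List (String × Int)) :
    ∀ b : PySem.Dict String (List (Option Int)),
      (ps.foldl (stepIn i) b).keys = PySem.Set.update b.keys (ps.map Prod.fst) := by
  induction ps with
  | nil => intro b; rfl
  | cons kv rest ih =>
    intro b
    rw [List.foldl_cons, List.map_cons, PySem.Set.update_cons, ih, stepIn_keys]

lemma innerF_getD_not_mem (i : Nat) (ps : List (String × Int)) (k : String)
    (hk : k ∉ ps.map Prod.fst) :
    ∀ b : PySem.Dict String (List (Option Int)),
      (ps.foldl (stepIn i) b).getD k [] = b.getD k [] := by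
  induction ps with
  | nil => intro b; rfl
  | cons kv rest ih =>
    intro b
    simp only [List.map_cons, List.mem_cons, not_or] at hk
    rw [List.foldl_cons, ih hk.2, stepIn_getD_ne _ _ _ _ hk.1]

lemma innerF_getD_mem (i : Nat) (ps : List (String × Int)) (k : String) (v : Int)
    (hnd : (ps.map Prod.fst).Nodup) (hmem : (k, v) ∈ ps) :
    ∀ b : PySem.Dict String (List (Option Int)),
      (ps.foldl (stepIn i) b).getD k [] =
        (if b.contains k then b.getD k [] else List.replicate i none) ++ [some v] := by
  induction ps with
  | nil => exact absurd hmem (List.not_mem_nil)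
  | cons kv rest ih =>
    intro b
    simp only [List.map_cons, List.nodup_cons] at hnd
    rw [List.foldl_cons]
    rcases List.mem_cons.mp hmem with h | h
    · -- kv = (k, v): the head writes the value, the rest never touches k
      subst h
      have hknr : k ∉ rest.map Prod.fst := hnd.1
      rw [innerF_getD_not_mem i rest k hknr, stepIn_getD_self i b (k, v)]
    · -- (k, v) in the tail; head key differs
      have hkne : k ≠ kv.1 := by
        intro he
        exact hnd.1 (he ▸ (List.mem_map.mpr ⟨(k, v), h, rfl⟩))
      rw [ih hnd.2 h, stepIn_contains_ne _ _ _ _ hkne, stepIn_getD_ne _ _ _ _ hkne]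

-- per-step and whole-loop facts for the padding loop
lemma stepOut_keys (row : PySem.Dict String Int) (b : PySem.Dict String (List (Option Int)))
    (k : String) (h : b.contains k = true) : (stepOut row b k).keys = b.keys := by
  unfold stepOut
  by_cases hr : row.contains k = true
  · rw [if_pos hr]
  · rw [if_neg hr, PySem.Dict.keys_modify, PySem.Dict.keys_insert_of_contains _ _ h]

lemma stepOut_getD (row : PySem.Dict String Int) (b : PySem.Dict String (List (Option Int)))
    (k k' : String) :
    (stepOut row b k).getD k' [] =
      if k' = k ∧ row.contains k = false then b.getD k' [] ++ [none] else b.getD k' [] := by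
  unfold stepOut
  by_cases hr : row.contains k = true
  · simp [hr]
  · rw [if_neg hr, PySem.Dict.getD_modify]
    by_cases he : k' = k
    · subst he; simp [hr]
    · simp [he]

lemma innerG_keys (row : PySem.Dict String Int) (l : List String) :
    ∀ b : PySem.Dict String (List (Option Int)), (∀ k ∈ l, b.contains k = true) →
      (l.foldl (stepOut row) b).keys = b.keys := by
  induction l with
  | nil => intro b _; rfl
  | cons k0 rest ih =>
    intro b hall
    have hk0 : b.contains k0 = true := hall k0 (List.mem_cons_self)
    have hkeys : (stepOut row b k0).keys = b.keys := stepOut_keys row b k0 hk0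
    have hall' : ∀ k ∈ rest, (stepOut row b k0).contains k = true := by
      intro k hk
      rw [dict_contains_eq_keys_contains, hkeys, ← dict_contains_eq_keys_contains]
      exact hall k (List.mem_cons_of_mem _ hk)
    rw [List.foldl_cons, ih _ hall', hkeys]

lemma innerG_getD (row : PySem.Dict String Int) (l : List String) (k : String) :
    ∀ b : PySem.Dict String (List (Option Int)), l.Nodup →
      (l.foldl (stepOut row) b).getD k [] =
        if k ∈ l ∧ row.contains k = false then b.getD k [] ++ [none] else b.getD k [] := by
  induction l with
  | nil => intro b _; simp
  | cons k0 rest ih =>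
    intro b hnd
    rw [List.nodup_cons] at hnd
    rw [List.foldl_cons, ih _ hnd.2, stepOut_getD]
    by_cases he : k = k0
    · subst he
      have : k ∉ rest := hnd.1
      by_cases hr : row.contains k = true <;> simp [this, hr]
    · by_cases hm : k ∈ rest <;> by_cases hr : row.contains k = true <;>
        simp [he, hm, hr]

-- facts about the invariant state SD
lemma KS_nodup (pre : List (List (String × Int))) : (KS pre).Nodup :=
  PySem.List.nodup_dedup _

lemma SD_keys (pre : List (List (String × Int))) : (SD pre).keys = KS pre := by
  show ((KS pre).map (fun k => (k, colS pre k))).map Prod.fst = KS pre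
  simp [Function.comp_def]

lemma SD_contains (pre : List (List (String × Int))) (k : String) :
    (SD pre).contains k = decide (k ∈ KS pre) := by
  rw [PySem.Dict.contains_eq_decide_mem_keys, SD_keys]

lemma SD_getD_mem (pre : List (List (String × Int))) (k : String) (h : k ∈ KS pre) :
    (SD pre).getD k [] = colS pre k := by
  exact PySem.Dict.getD_of_mem_items (SD pre) (List.mem_map.mpr ⟨k, h, rfl⟩)
    (by rw [SD_keys]; exact KS_nodup pre) []

lemma not_mem_KS_col (pre : List (List (String × Int))) (k : String) (h : k ∉ KS pre) :
    colS pre k = List.replicate pre.length none := by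
  have h1 : ∀ r ∈ pre, gvOf r k = none := by
    intro r hr
    refine (PySem.Dict.get?_eq_none_iff_not_mem_keys _ _).mpr ?_
    intro hk
    exact h ((PySem.List.mem_dedup _ _).mpr (List.mem_flatMap.mpr ⟨r, hr, hk⟩))
  calc colS pre k = pre.map (fun _ => none) := List.map_congr_left h1
    _ = List.replicate pre.length none := by simp [List.map_const']

lemma KS_append (pre : List (List (String × Int))) (r : List (String × Int)) :
    KS (pre ++ [r]) = PySem.Set.update (KS pre) (dkOf r) := by
  unfold KS
  rw [List.flatMap_append, PySem.List.dedup_eq_ofList, PySem.List.dedup_eq_ofList,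
    PySem.Set.ofList_append]
  simp [dkOf]

lemma colS_append (pre : List (List (String × Int))) (r : List (String × Int)) (k : String) :
    colS (pre ++ [r]) k = colS pre k ++ [gvOf r k] := by
  simp [colS]

-- the key step lemma: one iteration of A's outer loop preserves the invariant
lemma rowStepA_SD (pre : List (List (String × Int))) (r : List (String × Int)) :
    rowStepA (pre.length, SD pre) r = (pre.length + 1, SD (pre ++ [r])) := by
  rw [rowStepA_eq]
  refine Prod.ext rfl ?_
  set row := PySem.Dict.ofList r with hrow
  set ps := row.items with hps
  have hpsk : ps.map Prod.fst = dkOf r := rfl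
  have hpsnd : (ps.map Prod.fst).Nodup := by
    rw [hpsk]; exact PySem.Dict.nodup_keys_ofList r
  set b1 := ps.foldl (stepIn pre.length) (SD pre) with hb1
  have hb1keys : b1.keys = KS (pre ++ [r]) := by
    rw [hb1, innerF_keys, SD_keys, hpsk, KS_append]
  have hb1nd : b1.keys.Nodup := by
    rw [hb1keys, KS_append]; exact set_update_nodup _ (KS_nodup pre) _
  have hall : ∀ k ∈ b1.keys, b1.contains k = true := by
    intro k hk; exact (PySem.Dict.contains_iff_mem_keys b1 k).mpr hk
  set b2 := b1.keys.foldl (stepOut row) b1 with hb2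
  have hb2keys : b2.keys = KS (pre ++ [r]) := by
    rw [hb2, innerG_keys row _ _ hall, hb1keys]
  have hb2nd : b2.keys.Nodup := by rw [hb2keys]; exact KS_nodup _
  -- pointwise value of the final dict
  have hval : ∀ k ∈ KS (pre ++ [r]), b2.getD k [] = colS (pre ++ [r]) k := by
    intro k hk
    have hgd := innerG_getD row b1.keys k b1 hb1nd
    by_cases hdr : k ∈ dkOf r
    · -- k is a key of this row: the inner loop appended its value, no padding
      have hrc : row.contains k = true := (PySem.Dict.contains_iff_mem_keys row k).mpr hdr
      have hb2v : b2.getD k [] = b1.getD k [] := by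
        rw [hb2, hgd]; simp [hrc]
      obtain ⟨v, hv⟩ : ∃ v, row.get? k = some v := by
        rcases h : row.get? k with _ | v
        · exact absurd ((PySem.Dict.get?_eq_none_iff_not_mem_keys row k).mp h hdr) (by simp)
        · exact ⟨v, rfl⟩
      have hmem : (k, v) ∈ ps :=
        (PySem.Dict.get?_eq_some_iff_mem_items row k v (PySem.Dict.nodup_keys_ofList r)).mp hv
      have hb1v := innerF_getD_mem pre.length ps k v hpsnd hmem (SD pre)
      have hcol : (if (SD pre).contains k then (SD pre).getD k [] else
          List.replicate pre.length none) = colS pre k := by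
        by_cases hks : k ∈ KS pre
        · simp [SD_contains, hks, SD_getD_mem pre k hks]
        · simp [SD_contains, hks, (not_mem_KS_col pre k hks).symm]
      rw [hb2v, hb1v, hcol, colS_append]
      have : gvOf r k = some v := hv
      rw [this]
    · -- k is an old key absent from this row: inner loop skipped it, padding appended none
      have hks : k ∈ KS pre := by
        rcases mem_set_update _ _ _ (by rw [← KS_append]; exact hk) with h | h
        · exact h
        · exact absurd h hdr
      have hrc : row.contains k = false := by
        rcases h : row.contains k with _ | _
        · rfl
        · exact absurd ((PySem.Dict.contains_iff_mem_keys row k).mp h) hdr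
      have hb1v : b1.getD k [] = colS pre k := by
        rw [hb1, innerF_getD_not_mem _ _ _ (hpsk ▸ hdr), SD_getD_mem pre k hks]
      have hkb1 : k ∈ b1.keys := by rw [hb1keys]; exact hk
      have hgnone : gvOf r k = none :=
        (PySem.Dict.get?_eq_none_iff_not_mem_keys row k).mpr hdr
      rw [hb2, hgd]
      simp only [hkb1, hrc, true_and, if_pos, colS_append, hgnone, hb1v]
  -- assemble via items
  apply PySem.Dict.ext
  rw [PySem.Dict.items_eq_map_keys b2 hb2nd [], hb2keys]
  show _ = (KS (pre ++ [r])).map (fun k => (k, colS (pre ++ [r]) k))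
  exact List.map_congr_left (fun k hk => by rw [hval k hk])

lemma mainFold (rest : List (List (String × Int))) :
    ∀ pre, rest.foldl rowStepA (pre.length, SD pre) = ((pre ++ rest).length, SD (pre ++ rest)) := by
  induction rest with
  | nil => intro pre; simp
  | cons r rest ih =>
    intro pre
    rw [List.foldl_cons, rowStepA_SD pre r]
    have h1 : pre.length + 1 = (pre ++ [r]).length := by simp
    rw [h1, ih (pre ++ [r])]
    simp

-- ===== VERDICT (by name: the statement is the Claim_ definition above) =====
theorem rows_to_batched_spec : Claim_equal_rows_to_batched := by
  intro rows _
  show rows_to_batched rows = rows_to_batched_alt rows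
  -- A's side: fold from the empty state = SD rows
  have hstart : ((0 : Nat), (PySem.Dict.empty : PySem.Dict String (List (Option Int)))) =
      (List.length ([] : List (List (String × Int))), SD []) := rfl
  have hA : rows_to_batched rows = (SD rows).items := by
    unfold rows_to_batched
    rw [hstart, mainFold rows []]
    rfl
  -- B's side: fresh-key insert loop over distinct keys
  have hkeysnd : (PySem.List.dedup (rows.flatMap (fun r => (PySem.Dict.ofList r).keys))).Nodup :=
    PySem.List.nodup_dedup _
  have hB : rows_to_batched_alt rows =
      (KS rows).map (fun k => (k, colS rows k)) := by
    unfold rows_to_batched_alt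
    have h := PySem.Dict.items_foldl_insert_fresh
      (PySem.List.dedup (rows.flatMap (fun r => (PySem.Dict.ofList r).keys)))
      (fun a => a) (fun k => rows.map (fun r => (PySem.Dict.ofList r).get? k))
      PySem.Dict.empty (fun a _ => PySem.Dict.contains_empty a) (by simpa using hkeysnd)
    simpa [KS, dkOf, colS, gvOf] using h
  rw [hA, hB]
  rfl
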